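-- pv_equiv track=rewrite | github.com/matfizinf/Algorytmy | Algorytmy na tekstach/Szyfrowanie przestawieniowe/zad6.py | szyfr_mieszany
-- ===== SOURCE A (Python) =====
-- from math import ceil
--
-- def szyfr_mieszany(W, k):
--     liczba_wierszy = k
--     liczba_kolumn = ceil(len(W) / k)
--     pomocnicza = []
--     ind = 0
--
--     for i in range(liczba_wierszy):
--         wiersz = []
--         for j in range(liczba_kolumn):
--             if ind < len(W):
--                 wiersz.append(W[ind])
--             else:
--                 wiersz.append('_')
--             ind += 1
--         pomocnicza.append(wiersz)
--
--     wynik = []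
--
--     for j in range(liczba_kolumn):
--         if j % 2 == 0:
--             for i in range(liczba_wierszy):
--                 if pomocnicza[i][j] != '_':
--                     wynik.append(pomocnicza[i][j])
--         else:
--             for i in range(liczba_wierszy - 1, -1, -1):
--                 if pomocnicza[i][j] != '_':
--                     wynik.append(pomocnicza[i][j])
--
--     return ''.join(wynik)
-- ===== SOURCE B (Python) =====
-- from math import ceil
--
-- def szyfr_mieszany(W, k):
--     cols = ceil(len(W) / k)
--     out = []
--     for j in range(cols):
--         col = [W[t] for t in range(j, len(W), cols)]
--         out.extend(reversed(col) if j % 2 else col)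
--     return ''.join(c for c in out if c != '_')
-- ===== Notes on version B (the rewrite author's own statement) =====
-- stated objective: faster
-- what changed: B never builds A's padded k x cols grid: it reads each column directly from W by stride arithmetic (W[j], W[j+cols], ...), reverses odd columns, and drops '_' characters in one final filter, replacing A's two nested grid-building loops and its row-scanning column reads.
import Mathlib
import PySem

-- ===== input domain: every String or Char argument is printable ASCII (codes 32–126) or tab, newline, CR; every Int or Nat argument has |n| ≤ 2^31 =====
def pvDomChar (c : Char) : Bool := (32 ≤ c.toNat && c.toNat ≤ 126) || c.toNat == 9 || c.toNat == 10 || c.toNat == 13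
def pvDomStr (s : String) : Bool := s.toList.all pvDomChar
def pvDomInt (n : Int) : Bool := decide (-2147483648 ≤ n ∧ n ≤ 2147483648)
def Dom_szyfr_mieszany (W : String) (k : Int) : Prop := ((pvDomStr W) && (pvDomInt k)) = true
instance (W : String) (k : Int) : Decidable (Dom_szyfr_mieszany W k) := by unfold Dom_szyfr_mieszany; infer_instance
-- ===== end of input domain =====

-- B replaces A's padded k×cols grid and row-scanning column reads by direct index
-- arithmetic: one pass over the columns reading W[j], W[j+cols], … (reversed on odd
-- columns) and a final filter dropping '_' — no grid is ever built (objective: faster, measured).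

-- ===== PORT A =====
def szyfr_mieszany (W : String) (k : Int) : String :=
  let cs : List Char := W.toList
  let lw : Int := cs.length
  let liczba_wierszy : Int := k
  let liczba_kolumn : Int := -(PySem.Int.floordiv (-lw) k)  -- ceil(len(W)/k), exact for these magnitudes
  let st := (PySem.List.pyRange 0 liczba_wierszy 1).foldl
    (fun (st : List (List Char) × Int) _i =>
      let inner := (PySem.List.pyRange 0 liczba_kolumn 1).foldl
        (fun (st2 : List Char × Int) _j =>
          (if st2.2 < lw then st2.1 ++ [PySem.List.pyGetD cs st2.2 '_'] else st2.1 ++ ['_'],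
           st2.2 + 1))
        ([], st.2)
      (st.1 ++ [inner.1], inner.2))
    ([], 0)
  let pomocnicza := st.1
  let wynik := (PySem.List.pyRange 0 liczba_kolumn 1).foldl
    (fun (wynik : List Char) j =>
      if PySem.Int.mod j 2 = 0 then
        (PySem.List.pyRange 0 liczba_wierszy 1).foldl
          (fun acc i =>
            let c := PySem.List.pyGetD (PySem.List.pyGetD pomocnicza i []) j '_'
            if c ≠ '_' then acc ++ [c] else acc) wynik
      else
        (PySem.List.pyRange (liczba_wierszy - 1) (-1) (-1)).foldl
          (fun acc i =>
            let c := PySem.List.pyGetD (PySem.List.pyGetD pomocnicza i []) j '_'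
            if c ≠ '_' then acc ++ [c] else acc) wynik)
    []
  String.ofList wynik

-- ===== PORT B =====
def szyfr_mieszany_alt (W : String) (k : Int) : String :=
  let cs : List Char := W.toList
  let n : Int := cs.length
  let cols : Int := -(PySem.Int.floordiv (-n) k)  -- ceil(len(W)/k), exact for these magnitudes
  let out := (PySem.List.pyRange 0 cols 1).foldl
    (fun (out : List Char) j =>
      let col := (PySem.List.pyRange j n cols).map (fun t => PySem.List.pyGetD cs t '_')
      out ++ (if PySem.Int.mod j 2 ≠ 0 then col.reverse else col))
    []
  String.ofList (out.filter (fun c => c ≠ '_'))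

-- ===== PRECONDITION & SPEC =====
-- Pre_ excludes only k = 0, on which the Python A raises ZeroDivisionError.
def Pre_szyfr_mieszany (W : String) (k : Int) : Prop := k ≠ 0
instance (W : String) (k : Int) : Decidable (Pre_szyfr_mieszany W k) := by unfold Pre_szyfr_mieszany; infer_instance
def pvWitness_szyfr_mieszany : String × Int := ("tajny_tekst", 3)
def Spec_szyfr_mieszany (W : String) (k : Int) (out : String) : Prop := out = szyfr_mieszany_alt W k
instance (W : String) (k : Int) (out : String) : Decidable (Spec_szyfr_mieszany W k out) := by unfold Spec_szyfr_mieszany; infer_instance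

-- ===== CLAIM (what is proved, stated in full; the proofs are below) =====
def Claim_equal_szyfr_mieszany : Prop := ∀ (W : String) (k : Int), Dom_szyfr_mieszany W k → Pre_szyfr_mieszany W k → Spec_szyfr_mieszany W k (szyfr_mieszany W k)

-- ===== LEMMAS AND PROOFS =====

-- W[t] read with '_' as the out-of-range value (the padded grid reads exactly this).
def pvG (cs : List Char) (t : Int) : Char := PySem.List.pyGetD cs t '_'
def pvPad (cs : List Char) (t : Int) : Char :=
  if t < (cs.length : Int) then PySem.List.pyGetD cs t '_' else '_'
def pvRow (cs : List Char) (C : Nat) (i0 : Int) : List Char :=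
  (List.range C).map (fun d : Nat => pvPad cs (i0 + (d : Int)))

-- column j of A's conceptual grid, already filtered of '_' (A's inner i-loop output)
def pvColA (cs : List Char) (k cols j : Int) : List Char :=
  (((PySem.List.pyRange 0 k 1).map (fun i => i * cols + j)).filter
     (fun t => decide (pvG cs t ≠ '_'))).map (pvG cs)
-- column j as B reads it, filtered of '_'
def pvColB (cs : List Char) (cols j : Int) : List Char :=
  (((PySem.List.pyRange j (cs.length : Int) cols).map (pvG cs)).filter
     (fun c => decide (c ≠ '_')))

theorem pvPad_eq_g (cs : List Char) (t : Int) (ht : 0 ≤ t) : pvPad cs t = pvG cs t := by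
  unfold pvPad pvG
  split
  · rfl
  · rw [PySem.List.pyGetD_of_nonneg cs _ ht, List.getD_eq_default]
    omega
theorem pvG_of_ge (cs : List Char) (t : Int) (ht : (cs.length : Int) ≤ t) : pvG cs t = '_' := by
  unfold pvG
  rw [PySem.List.pyGetD_of_nonneg cs _ (by omega), List.getD_eq_default]
  omega

theorem pvRow_succ (cs : List Char) (C : Nat) (i : Int) :
    pvRow cs (C + 1) i = pvPad cs i :: pvRow cs C (i + 1) := by
  unfold pvRow
  rw [List.range_succ_eq_map, List.map_cons, List.map_map]
  simp only [Nat.cast_zero, add_zero]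
  congr 1
  apply List.map_congr_left
  intro d _
  simp only [Function.comp_apply, Nat.succ_eq_add_one]
  congr 1
  push_cast
  ring

theorem pv_inner (cs : List Char) (L : List Int) (w : List Char) (i : Int) :
    L.foldl
      (fun (st2 : List Char × Int) _ =>
        (if st2.2 < (cs.length : Int) then st2.1 ++ [PySem.List.pyGetD cs st2.2 '_']
         else st2.1 ++ ['_'], st2.2 + 1)) (w, i)
    = (w ++ pvRow cs L.length i, i + L.length) := by
  induction L generalizing w i with
  | nil => simp [pvRow]
  | cons a t ih =>
    simp only [List.foldl_cons]
    have h1 : ((if i < (cs.length : Int) then w ++ [PySem.List.pyGetD cs i '_'] else w ++ ['_'] : List Char), i + 1)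
        = (w ++ [pvPad cs i], i + 1) := by
      unfold pvPad; split <;> simp
    rw [h1, ih, List.length_cons, pvRow_succ]
    simp only [Prod.mk.injEq]
    refine ⟨by simp, by push_cast; ring⟩
theorem pv_outer (cs : List Char) (C : Nat) (L : List Int) (gacc : List (List Char)) (i0 : Int) :
    L.foldl
      (fun (st : List (List Char) × Int) _ => (st.1 ++ [pvRow cs C st.2], st.2 + C)) (gacc, i0)
    = (gacc ++ (List.range L.length).map (fun r : Nat => pvRow cs C (i0 + (r : Int) * (C : Int))),
       i0 + L.length * C) := by
  induction L generalizing gacc i0 with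
  | nil => simp
  | cons a t ih =>
    simp only [List.foldl_cons]
    rw [ih, List.length_cons, List.range_succ_eq_map, List.map_cons, List.map_map]
    simp only [Prod.mk.injEq]
    constructor
    · simp only [Nat.cast_zero, zero_mul, add_zero, List.append_assoc, List.singleton_append]
      congr 2
      apply List.map_congr_left
      intro d _
      simp only [Function.comp_apply, Nat.succ_eq_add_one]
      congr 1
      push_cast
      ring
    · push_cast
      ring

theorem pv_lookup (cs : List Char) (C K : Nat) (i j : Int)
    (hi0 : 0 ≤ i) (hiK : i < (K : Int)) (hj0 : 0 ≤ j) (hjC : j < (C : Int)) :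
    PySem.List.pyGetD
      (PySem.List.pyGetD ((List.range K).map (fun r : Nat => pvRow cs C ((r : Int) * (C : Int)))) i []) j '_'
    = pvPad cs (i * C + j) := by
  rw [PySem.List.pyGetD_eq_getElem _ _ hi0 (by simpa using hiK)]
  rw [List.getElem_map, List.getElem_range]
  have hlen : (pvRow cs C ((i.toNat : Int) * C)).length = C := by simp [pvRow]
  rw [PySem.List.pyGetD_eq_getElem _ _ hj0 (by rw [hlen]; exact hjC)]
  unfold pvRow
  rw [List.getElem_map, List.getElem_range]
  congr 1
  rw [Int.toNat_of_nonneg hi0, Int.toNat_of_nonneg hj0]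

-- the main combinatorial fact: A's column-index list, filtered of '_' reads,
-- coincides with B's strided index list, filtered likewise
theorem pv_col (cs : List Char) (k cols j : Int) (hk : 0 < k) (hc : 0 < cols)
    (hn : (cs.length : Int) ≤ k * cols) (hj0 : 0 ≤ j) (_hj : j < cols) :
    ((PySem.List.pyRange 0 k 1).map (fun i => i * cols + j)).filter
        (fun t => decide (pvG cs t ≠ '_'))
    = (PySem.List.pyRange j (cs.length : Int) cols).filter
        (fun t => decide (pvG cs t ≠ '_')) := by
  have hR : ∃ R : Nat, PySem.List.pyRange j (cs.length : Int) cols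
      = (List.range R).map (fun m : Nat => j + cols * (m : Int)) ∧ R ≤ k.toNat ∧
        ∀ m : Nat, R ≤ m → (cs.length : Int) ≤ (m : Int) * cols + j := by
    rw [PySem.List.pyRange_of_pos j (cs.length : Int) hc]
    by_cases hjn : j < (cs.length : Int)
    · have hd := Int.mul_ediv_add_emod ((cs.length : Int) - j + cols - 1) cols
      have hr0 := Int.emod_nonneg ((cs.length : Int) - j + cols - 1) (by omega : cols ≠ 0)
      have hr1 := Int.emod_lt_of_pos ((cs.length : Int) - j + cols - 1) hc
      set q0 := ((cs.length : Int) - j + cols - 1) / cols with hq0def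
      have hq00 : 0 ≤ q0 := Int.ediv_nonneg (by omega) (le_of_lt hc)
      refine ⟨q0.toNat, by simp [hjn], ?_, ?_⟩
      · have hqk : q0 ≤ k := by
          by_contra hcon
          rw [not_le] at hcon
          have h1 : cols * (k + 1) ≤ cols * q0 :=
            mul_le_mul_of_nonneg_left (by omega) (le_of_lt hc)
          have h3 : cols * (k + 1) = k * cols + cols := by ring
          omega
        omega
      · intro m hm
        have hqm : q0 ≤ (m : Int) := by omega
        have h1 : cols * q0 ≤ cols * (m : Int) :=
          mul_le_mul_of_nonneg_left hqm (le_of_lt hc)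
        have h2 : cols * (m : Int) = (m : Int) * cols := by ring
        omega
    · refine ⟨0, by simp [hjn], by omega, ?_⟩
      intro m _
      have h1 : 0 ≤ (m : Int) * cols := mul_nonneg (by positivity) (le_of_lt hc)
      omega
  obtain ⟨R, hReq, hRle, hRge⟩ := hR
  rw [hReq, PySem.List.pyRange_one]
  simp only [sub_zero, List.map_map]
  have hsplit : List.range k.toNat
      = List.range R ++ (List.range (k.toNat - R)).map (fun x => R + x) := by
    rw [← List.range_add, Nat.add_sub_cancel' hRle]
  rw [hsplit, List.map_append, List.filter_append]
  have hnil : List.filter (fun t => decide (pvG cs t ≠ '_'))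
      (List.map ((fun i => i * cols + j) ∘ fun m : Nat => (0 : Int) + (m : Int))
        (List.map (fun x => R + x) (List.range (k.toNat - R)))) = [] := by
    rw [List.filter_eq_nil_iff]
    intro a ha
    simp only [List.map_map, List.mem_map, List.mem_range] at ha
    obtain ⟨x, _, rfl⟩ := ha
    simp only [Function.comp_apply, zero_add]
    have hge : (cs.length : Int) ≤ ((R + x : Nat) : Int) * cols + j :=
      hRge (R + x) (Nat.le_add_right _ _)
    rw [pvG_of_ge cs _ hge]
    simp
  rw [hnil, List.append_nil]
  congr 1
  apply List.map_congr_left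
  intro m _
  simp only [Function.comp_apply, zero_add]
  ring

theorem pv_colAB (cs : List Char) (k cols j : Int) (hk : 0 < k) (hc : 0 < cols)
    (hn : (cs.length : Int) ≤ k * cols) (hj0 : 0 ≤ j) (hj : j < cols) :
    pvColA cs k cols j = pvColB cs cols j := by
  unfold pvColA pvColB
  rw [pv_col cs k cols j hk hc hn hj0 hj, List.filter_map]
  rfl

theorem pvColA_eq (cs : List Char) (k cols j : Int) :
    ((PySem.List.pyRange 0 k 1).filter
        (fun i => decide (pvG cs (i * cols + j) ≠ '_'))).map (fun i => pvG cs (i * cols + j))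
    = pvColA cs k cols j := by
  unfold pvColA
  rw [List.filter_map, List.map_map]
  rfl

theorem pv_phase1 (cs : List Char) (k cols : Int) :
    (((PySem.List.pyRange 0 k 1).foldl
      (fun (st : List (List Char) × Int) _i =>
        (st.1 ++ [((PySem.List.pyRange 0 cols 1).foldl
            (fun (st2 : List Char × Int) _j =>
              (if st2.2 < (cs.length : Int) then st2.1 ++ [PySem.List.pyGetD cs st2.2 '_']
               else st2.1 ++ ['_'], st2.2 + 1))
            ([], st.2)).1],
         ((PySem.List.pyRange 0 cols 1).foldl
            (fun (st2 : List Char × Int) _j =>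
              (if st2.2 < (cs.length : Int) then st2.1 ++ [PySem.List.pyGetD cs st2.2 '_']
               else st2.1 ++ ['_'], st2.2 + 1))
            ([], st.2)).2))
      ([], 0)).1)
    = (List.range k.toNat).map
        (fun r : Nat => pvRow cs cols.toNat ((r : Int) * (cols.toNat : Int))) := by
  have hbody : ∀ (st : List (List Char) × Int), ∀ a ∈ PySem.List.pyRange 0 k 1,
      (st.1 ++ [((PySem.List.pyRange 0 cols 1).foldl
          (fun (st2 : List Char × Int) _j =>
            (if st2.2 < (cs.length : Int) then st2.1 ++ [PySem.List.pyGetD cs st2.2 '_']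
             else st2.1 ++ ['_'], st2.2 + 1))
          ([], st.2)).1],
       ((PySem.List.pyRange 0 cols 1).foldl
          (fun (st2 : List Char × Int) _j =>
            (if st2.2 < (cs.length : Int) then st2.1 ++ [PySem.List.pyGetD cs st2.2 '_']
             else st2.1 ++ ['_'], st2.2 + 1))
          ([], st.2)).2)
      = (st.1 ++ [pvRow cs cols.toNat st.2], st.2 + (cols.toNat : Int)) := by
    intro st a _
    rw [pv_inner cs (PySem.List.pyRange 0 cols 1) [] st.2]
    simp [PySem.List.length_pyRange_one]
  rw [PySem.List.foldl_congr_mem _ _ _ _ hbody, pv_outer]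
  simp [PySem.List.length_pyRange_one]

theorem szyfr_eq (W : String) (k : Int) (hk : k ≠ 0) :
    szyfr_mieszany W k = szyfr_mieszany_alt W k := by
  simp only [szyfr_mieszany, szyfr_mieszany_alt]
  set cs := W.toList with hcs
  by_cases hcpos : 0 < -(PySem.Int.floordiv (-(cs.length : Int)) k)
  case neg =>
    rw [PySem.List.pyRange_one_eq_nil
      (show -(PySem.Int.floordiv (-(cs.length : Int)) k) ≤ 0 by omega)]
    simp
  case pos =>
    have hkpos : 0 < k := by
      rcases lt_trichotomy k 0 with hneg | h0 | hpos
      · exfalso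
        have h1 : PySem.Int.floordiv (-(cs.length : Int)) k
            = PySem.Int.floordiv (cs.length : Int) (-k) := by
          have := PySem.Int.floordiv_neg_neg (cs.length : Int) (-k)
          simpa using this
        have h2 : 0 ≤ PySem.Int.floordiv (cs.length : Int) (-k) := by
          rw [PySem.Int.floordiv_eq_ediv_of_pos (by omega)]
          exact Int.ediv_nonneg (by positivity) (by omega)
        omega
      · exact absurd h0 hk
      · exact hpos
    set cols := -(PySem.Int.floordiv (-(cs.length : Int)) k) with hcolsdef
    have hnk : (cs.length : Int) ≤ k * cols := by
      have := ((PySem.Int.neg_floordiv_neg_eq_iff_of_pos hkpos).mp hcolsdef.symm).2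
      simpa [mul_comm] using this
    rw [pv_phase1 cs k cols]
    -- per-cell lookup in the characterized grid
    have hcell : ∀ i j : Int, 0 ≤ i → i < k → 0 ≤ j → j < cols →
        PySem.List.pyGetD (PySem.List.pyGetD
          ((List.range k.toNat).map
            (fun r : Nat => pvRow cs cols.toNat ((r : Int) * (cols.toNat : Int)))) i []) j '_'
        = pvG cs (i * cols + j) := by
      intro i j hi0 hik hj0 hjc
      rw [pv_lookup cs cols.toNat k.toNat i j hi0 (by omega) hj0 (by omega)]
      rw [Int.toNat_of_nonneg (le_of_lt hcpos)]
      exact pvPad_eq_g cs _ (by positivity)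
    -- phase 2 of A: each column loop is a filtered map
    have hbody2 : ∀ (acc : List Char), ∀ jj ∈ PySem.List.pyRange 0 cols 1,
        (if PySem.Int.mod jj 2 = 0 then
          (PySem.List.pyRange 0 k 1).foldl
            (fun acc2 i =>
              if PySem.List.pyGetD (PySem.List.pyGetD
                  ((List.range k.toNat).map
                    (fun r : Nat => pvRow cs cols.toNat ((r : Int) * (cols.toNat : Int)))) i []) jj '_' ≠ '_'
              then acc2 ++ [PySem.List.pyGetD (PySem.List.pyGetD
                  ((List.range k.toNat).map
                    (fun r : Nat => pvRow cs cols.toNat ((r : Int) * (cols.toNat : Int)))) i []) jj '_']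
              else acc2) acc
        else
          (PySem.List.pyRange (k - 1) (-1) (-1)).foldl
            (fun acc2 i =>
              if PySem.List.pyGetD (PySem.List.pyGetD
                  ((List.range k.toNat).map
                    (fun r : Nat => pvRow cs cols.toNat ((r : Int) * (cols.toNat : Int)))) i []) jj '_' ≠ '_'
              then acc2 ++ [PySem.List.pyGetD (PySem.List.pyGetD
                  ((List.range k.toNat).map
                    (fun r : Nat => pvRow cs cols.toNat ((r : Int) * (cols.toNat : Int)))) i []) jj '_']
              else acc2) acc)
        = acc ++ (if PySem.Int.mod jj 2 = 0 then pvColA cs k cols jj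
                  else (pvColA cs k cols jj).reverse) := by
      intro acc jj hjj
      rw [PySem.List.mem_pyRange_one] at hjj
      have hcell' : ∀ i ∈ PySem.List.pyRange 0 k 1,
          PySem.List.pyGetD (PySem.List.pyGetD
            ((List.range k.toNat).map
              (fun r : Nat => pvRow cs cols.toNat ((r : Int) * (cols.toNat : Int)))) i []) jj '_'
          = pvG cs (i * cols + jj) := by
        intro i hi
        rw [PySem.List.mem_pyRange_one] at hi
        exact hcell i jj hi.1 hi.2 hjj.1 hjj.2
      by_cases hpar : PySem.Int.mod jj 2 = 0
      · simp only [hpar, if_pos]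
        have hc1 : ∀ (acc2 : List Char), ∀ i ∈ PySem.List.pyRange 0 k 1,
            (if PySem.List.pyGetD (PySem.List.pyGetD
                ((List.range k.toNat).map
                  (fun r : Nat => pvRow cs cols.toNat ((r : Int) * (cols.toNat : Int)))) i []) jj '_' ≠ '_'
             then acc2 ++ [PySem.List.pyGetD (PySem.List.pyGetD
                ((List.range k.toNat).map
                  (fun r : Nat => pvRow cs cols.toNat ((r : Int) * (cols.toNat : Int)))) i []) jj '_']
             else acc2)
            = (if pvG cs (i * cols + jj) ≠ '_' then acc2 ++ [pvG cs (i * cols + jj)] else acc2) := by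
          intro acc2 i hi
          rw [hcell' i hi]
        rw [PySem.List.foldl_congr_mem _ _ _ _ hc1,
            PySem.List.foldl_append_ite (fun i => pvG cs (i * cols + jj) ≠ '_')
              (fun i => pvG cs (i * cols + jj)), pvColA_eq]
      · simp only [hpar, if_false]
        have hrev : PySem.List.pyRange (k - 1) (-1) (-1) = (PySem.List.pyRange 0 k 1).reverse := by
          rw [PySem.List.pyRange_neg_one_eq_reverse]
          norm_num
        rw [hrev]
        have hc1 : ∀ (acc2 : List Char), ∀ i ∈ (PySem.List.pyRange 0 k 1).reverse,
            (if PySem.List.pyGetD (PySem.List.pyGetD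
                ((List.range k.toNat).map
                  (fun r : Nat => pvRow cs cols.toNat ((r : Int) * (cols.toNat : Int)))) i []) jj '_' ≠ '_'
             then acc2 ++ [PySem.List.pyGetD (PySem.List.pyGetD
                ((List.range k.toNat).map
                  (fun r : Nat => pvRow cs cols.toNat ((r : Int) * (cols.toNat : Int)))) i []) jj '_']
             else acc2)
            = (if pvG cs (i * cols + jj) ≠ '_' then acc2 ++ [pvG cs (i * cols + jj)] else acc2) := by
          intro acc2 i hi
          rw [List.mem_reverse] at hi
          rw [hcell' i hi]
        rw [PySem.List.foldl_congr_mem _ _ _ _ hc1,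
            PySem.List.foldl_append_ite (fun i => pvG cs (i * cols + jj) ≠ '_')
              (fun i => pvG cs (i * cols + jj)), List.filter_reverse, List.map_reverse, pvColA_eq]
    rw [PySem.List.foldl_congr_mem _ _ _ _ hbody2,
        PySem.List.foldl_append_eq_flatMap, PySem.List.foldl_append_eq_flatMap,
        List.nil_append, List.nil_append, List.filter_flatMap]
    congr 1
    apply List.flatMap_congr
    intro jj hjj
    rw [PySem.List.mem_pyRange_one] at hjj
    by_cases hpar : PySem.Int.mod jj 2 = 0
    · rw [if_pos hpar, if_neg (not_not_intro hpar),
          pv_colAB cs k cols jj hkpos hcpos hnk hjj.1 hjj.2]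
      rfl
    · rw [if_neg hpar, if_pos hpar, List.filter_reverse,
          pv_colAB cs k cols jj hkpos hcpos hnk hjj.1 hjj.2]
      rfl

-- ===== VERDICT (by name: the statement is the Claim_ definition above) =====
theorem szyfr_mieszany_spec : Claim_equal_szyfr_mieszany := by
  intro W k _ hk
  unfold Spec_szyfr_mieszany
  exact szyfr_eq W k hk
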